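-- pv_equiv track=rewrite | github.com/m9dswyptrn-web/SupersonicBuilder | scripts/version_bump.py | decide_bump
-- ===== SOURCE A (Python) =====
-- def decide_bump(msgs):
--     mode = "patch"
--     for s in msgs:
--         low = s.lower()
--         if "breaking:" in low or "feat!: " in low or "feat!:" in low:
--             return "major"
--         if low.startswith("feat:"):
--             mode = "minor"
--         elif low.startswith("fix:") and mode!="minor":
--             mode = "patch"
--     return mode
-- ===== SOURCE B (Python) =====
-- def decide_bump(msgs):
--     lows = [s.lower() for s in msgs]
--     if any(("breaking:" in low) or ("feat!:" in low) for low in lows):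
--         return "major"
--     if any(low.startswith("feat:") for low in lows):
--         return "minor"
--     return "patch"
-- ===== Notes on version B (the rewrite author's own statement) =====
-- stated objective: simpler
-- what changed: Replaces the stateful loop with early return and a dead 'fix:' branch (mode is already 'patch' whenever that branch can fire) by two stateless priority-ordered any() scans: major if any message contains 'breaking:'/'feat!:', else minor if any starts with 'feat:', else patch.
import Mathlib
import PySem

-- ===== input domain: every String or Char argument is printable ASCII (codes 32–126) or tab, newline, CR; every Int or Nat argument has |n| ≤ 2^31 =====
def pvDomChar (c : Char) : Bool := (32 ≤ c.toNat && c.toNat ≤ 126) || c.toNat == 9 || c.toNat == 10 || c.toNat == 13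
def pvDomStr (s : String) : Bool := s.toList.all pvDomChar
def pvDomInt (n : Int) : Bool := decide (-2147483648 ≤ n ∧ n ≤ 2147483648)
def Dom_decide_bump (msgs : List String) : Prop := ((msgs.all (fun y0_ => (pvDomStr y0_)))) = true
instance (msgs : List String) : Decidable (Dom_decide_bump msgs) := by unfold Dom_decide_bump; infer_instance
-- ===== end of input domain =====

-- B replaces A's stateful loop (early return, mode accumulator, dead 'fix:' branch) with two stateless priority-ordered any-scans; objective: simpler.


-- ===== PORT A =====
def decide_bump_go : List String → String → String
  | [], mode => mode
  | s :: t, mode =>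
    if PySem.Str.isIn "breaking:" (PySem.Str.lower s) || PySem.Str.isIn "feat!: " (PySem.Str.lower s)
        || PySem.Str.isIn "feat!:" (PySem.Str.lower s) then
      "major"
    else if PySem.Str.startswith (PySem.Str.lower s) "feat:" then
      decide_bump_go t "minor"
    else if PySem.Str.startswith (PySem.Str.lower s) "fix:" && mode ≠ "minor" then
      decide_bump_go t "patch"
    else
      decide_bump_go t mode

def decide_bump (msgs : List String) : String := decide_bump_go msgs "patch"

-- ===== PORT B =====
def decide_bump_alt (msgs : List String) : String :=
  let lows := msgs.map PySem.Str.lower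
  if lows.any (fun low => PySem.Str.isIn "breaking:" low || PySem.Str.isIn "feat!:" low) then "major"
  else if lows.any (fun low => PySem.Str.startswith low "feat:") then "minor"
  else "patch"

-- ===== PRECONDITION & SPEC =====
def Spec_decide_bump (msgs : List String) (out : String) : Prop := out = decide_bump_alt msgs
instance (msgs : List String) (out : String) : Decidable (Spec_decide_bump msgs out) := by unfold Spec_decide_bump; infer_instance

-- ===== CLAIM (what is proved, stated in full; the proofs are below) =====
def Claim_equal_decide_bump : Prop := ∀ (msgs : List String), Dom_decide_bump msgs → Spec_decide_bump msgs (decide_bump msgs)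

-- ===== LEMMAS AND PROOFS =====

-- 'feat!: ' occurring in a string implies 'feat!:' occurring in it.
theorem feat_space_imp (low : String) :
    PySem.Str.isIn "feat!: " low = true → PySem.Str.isIn "feat!:" low = true := by
  intro h
  have hinf := (PySem.Str.isIn_iff_infix _ _).mp h
  have hsub : ("feat!:".toList : List Char) <:+: "feat!: ".toList := by decide
  exact (PySem.Str.isIn_iff_infix _ _).mpr (hsub.trans hinf)

-- A's three-way major test collapses to B's two-way test.
theorem majorCond_collapse (low : String) :
    (PySem.Str.isIn "breaking:" low || PySem.Str.isIn "feat!: " low || PySem.Str.isIn "feat!:" low)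
      = (PySem.Str.isIn "breaking:" low || PySem.Str.isIn "feat!:" low) := by
  cases hc : PySem.Str.isIn "feat!:" low with
  | true => simp
  | false =>
    cases hb : PySem.Str.isIn "feat!: " low with
    | true => rw [feat_space_imp low hb] at hc; cases hc
    | false => simp

theorem go_minor (msgs : List String) :
    decide_bump_go msgs "minor" =
      if msgs.any (fun s => PySem.Str.isIn "breaking:" (PySem.Str.lower s)
          || PySem.Str.isIn "feat!:" (PySem.Str.lower s)) then "major" else "minor" := by
  induction msgs with
  | nil => simp [decide_bump_go]
  | cons s t ih =>
    rw [decide_bump_go, majorCond_collapse, List.any_cons]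
    cases hM : (PySem.Str.isIn "breaking:" (PySem.Str.lower s)
        || PySem.Str.isIn "feat!:" (PySem.Str.lower s)) with
    | true => rw [if_pos rfl, if_pos (by rw [Bool.true_or])]
    | false =>
      rw [if_neg (by simp), Bool.false_or]
      cases hF : PySem.Str.startswith (PySem.Str.lower s) "feat:" with
      | true => rw [if_pos rfl, ih]
      | false => rw [if_neg (by simp), if_neg (by simp), ih]

theorem go_patch (msgs : List String) :
    decide_bump_go msgs "patch" = decide_bump_alt msgs := by
  induction msgs with
  | nil => simp [decide_bump_go, decide_bump_alt]
  | cons s t ih =>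
    rw [decide_bump_go, majorCond_collapse]
    rw [decide_bump_alt]
    simp only [List.map_cons, List.any_cons, List.any_map, Function.comp_def]
    rw [decide_bump_alt] at ih
    simp only [List.any_map, Function.comp_def] at ih
    cases hM : (PySem.Str.isIn "breaking:" (PySem.Str.lower s)
        || PySem.Str.isIn "feat!:" (PySem.Str.lower s)) with
    | true => rw [if_pos rfl, if_pos (by rw [Bool.true_or])]
    | false =>
      rw [if_neg (by simp), Bool.false_or]
      cases hF : PySem.Str.startswith (PySem.Str.lower s) "feat:" with
      | true =>
        rw [if_pos rfl, go_minor]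
        by_cases hT : (t.any fun s => PySem.Str.isIn "breaking:" (PySem.Str.lower s)
            || PySem.Str.isIn "feat!:" (PySem.Str.lower s)) = true
        · rw [if_pos hT, if_pos hT]
        · rw [if_neg hT, if_neg hT, if_pos (by rw [Bool.true_or])]
      | false =>
        rw [if_neg (by simp), Bool.false_or]
        cases hX : PySem.Str.startswith (PySem.Str.lower s) "fix:" with
        | true => rw [if_pos (by decide), ih]
        | false => rw [if_neg (by decide), ih]

-- ===== VERDICT (by name: the statement is the Claim_ definition above) =====
theorem decide_bump_spec : Claim_equal_decide_bump := by
  intro msgs _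
  unfold Spec_decide_bump decide_bump
  exact go_patch msgs
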